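-- pv_equiv track=rewrite | github.com/floordiv/iris | core/textutils.py | get_string_pairs_indexes
-- ===== SOURCE A (Python) =====
-- from itertools import chain
--
-- def get_string_pairs_indexes(line):
--     indexes = []
--     in_string = False
--     prev_string_opener = None
--
--     for index, letter in enumerate(line):
--         if letter in ('"', "'"):
--             if letter == prev_string_opener:
--                 in_string = False
--             elif not in_string:
--                 in_string = True
--                 prev_string_opener = letter
--
--             indexes.append(index)
--
--     if len(indexes) % 2 != 0:
--         indexes = indexes[:-1]
--
--     return list(chain.from_iterable([range(*pair) for pair in group_by_pairs(indexes)]))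
--
-- def group_by_pairs(lst):
--     result = []
--
--     for index in range(0, len(lst), 2):
--         result.append([lst[index], lst[index + 1]])
--
--     return result
-- ===== SOURCE B (Python) =====
-- def get_string_pairs_indexes(line):
--     result = []
--     open_pos = None
--     for i, ch in enumerate(line):
--         if ch in ('"', "'"):
--             if open_pos is None:
--                 open_pos = i
--             else:
--                 result.extend(range(open_pos, i))
--                 open_pos = None
--     return result
-- ===== Notes on version B (the rewrite author's own statement) =====
-- stated objective: simpler
-- what changed: B replaces A's three phases (collect all quote indices, drop a dangling last one, group into pairs and expand ranges) with a single enumerate pass keeping one open_pos variable that emits each range as soon as the closing quote is seen.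
import Mathlib
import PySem

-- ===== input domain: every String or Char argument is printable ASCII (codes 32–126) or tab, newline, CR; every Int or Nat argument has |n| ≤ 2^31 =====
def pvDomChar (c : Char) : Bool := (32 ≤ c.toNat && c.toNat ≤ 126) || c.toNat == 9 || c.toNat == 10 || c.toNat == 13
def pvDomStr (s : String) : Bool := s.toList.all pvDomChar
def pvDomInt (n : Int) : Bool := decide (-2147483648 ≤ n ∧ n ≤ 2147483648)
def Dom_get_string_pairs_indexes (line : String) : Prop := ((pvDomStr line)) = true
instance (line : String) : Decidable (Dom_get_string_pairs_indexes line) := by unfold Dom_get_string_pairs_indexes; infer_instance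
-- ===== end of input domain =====

-- B is a single pass with one open_pos variable instead of A's collect/trim/group-and-expand phases (same behaviour, simpler).

-- ===== PORT A =====
-- group_by_pairs: the Python 'for index in range(0, len(lst), 2)' loop, transcribed as a
-- while-style recursion on the index (step 2); lst[index] / lst[index+1] via pyGet?.
-- The '.getD 0' is unreachable at call sites (the caller always passes an even-length list,
-- where both reads are in range; Python would raise IndexError only on odd length).
def pv_gbp_loop (lst : List Int) (i : Nat) (result : List (Int × Int)) : List (Int × Int) :=
  if _h : i < lst.length then
    pv_gbp_loop lst (i + 2)
      (result ++ [((PySem.List.pyGet? lst (i : Int)).getD 0,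
                   (PySem.List.pyGet? lst ((i : Int) + 1)).getD 0)])
  else result
termination_by lst.length - i

def group_by_pairs (lst : List Int) : List (Int × Int) :=
  pv_gbp_loop lst 0 []

def get_string_pairs_indexes (line : String) : List Int :=
  -- the for-loop over enumerate(line): state = (indexes, in_string, prev_string_opener)
  let st := (PySem.List.enumerate line.toList).foldl
    (fun (st : List Int × Bool × Option Char) (p : Int × Char) =>
      if p.2 = '"' ∨ p.2 = '\'' then
        let st' :=
          if some p.2 = st.2.2 then (st.1, false, st.2.2)
          else if st.2.1 = false then (st.1, true, some p.2)
          else st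
        (st'.1 ++ [p.1], st'.2)
      else st)
    ([], false, none)
  let indexes := st.1
  let indexes := if indexes.length % 2 ≠ 0 then indexes.dropLast else indexes
  -- list(chain.from_iterable([range(*pair) for pair in group_by_pairs(indexes)]))
  ((group_by_pairs indexes).map (fun pair => PySem.List.pyRange pair.1 pair.2 1)).flatten

-- ===== PORT B =====
def get_string_pairs_indexes_alt (line : String) : List Int :=
  -- single pass: state = (result, open_pos)
  let st := (PySem.List.enumerate line.toList).foldl
    (fun (st : List Int × Option Int) (p : Int × Char) =>
      if p.2 = '"' ∨ p.2 = '\'' then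
        match st.2 with
        | none => (st.1, some p.1)
        | some o => (st.1 ++ PySem.List.pyRange o p.1 1, none)
      else st)
    ([], none)
  st.1

-- ===== PRECONDITION & SPEC =====
def Spec_get_string_pairs_indexes (line : String) (out : List Int) : Prop := out = get_string_pairs_indexes_alt line
instance (line : String) (out : List Int) : Decidable (Spec_get_string_pairs_indexes line out) := by unfold Spec_get_string_pairs_indexes; infer_instance

-- ===== CLAIM (what is proved, stated in full; the proofs are below) =====
def Claim_equal_get_string_pairs_indexes : Prop := ∀ (line : String), Dom_get_string_pairs_indexes line → Spec_get_string_pairs_indexes line (get_string_pairs_indexes line)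

-- ===== LEMMAS AND PROOFS =====

-- the quote positions of an enumerated character list, as Ints
def pvQuotes (l : List (Int × Char)) : List Int :=
  l.filterMap (fun p => if p.2 = '"' ∨ p.2 = '\'' then some p.1 else none)

-- reference: expand consecutive pairs
def pvPairExpand : List Int → List Int
  | a :: b :: r => PySem.List.pyRange a b 1 ++ pvPairExpand r
  | _ => []

-- A's fold appends a quote's index regardless of the bool/option state
theorem pvA_fold_indexes (l : List (Int × Char)) (idx : List Int) (s : Bool) (pr : Option Char) :
    ((l.foldl
      (fun (st : List Int × Bool × Option Char) (p : Int × Char) =>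
        if p.2 = '"' ∨ p.2 = '\'' then
          let st' :=
            if some p.2 = st.2.2 then (st.1, false, st.2.2)
            else if st.2.1 = false then (st.1, true, some p.2)
            else st
          (st'.1 ++ [p.1], st'.2)
        else st)
      (idx, s, pr)).1) = idx ++ pvQuotes l := by
  induction l generalizing idx s pr with
  | nil => simp [pvQuotes]
  | cons p r ih =>
    by_cases hq : p.2 = '"' ∨ p.2 = '\''
    · simp only [List.foldl_cons, pvQuotes, List.filterMap_cons, if_pos hq]
      split_ifs <;> simp [ih, pvQuotes]
    · simp [List.foldl_cons, pvQuotes, if_neg hq, ih, pvQuotes]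

-- B's fold expands ranges on the fly; pvProc is what it does to the remaining quote list
def pvProc : Option Int → List Int → List Int
  | _, [] => []
  | none, a :: r => pvProc (some a) r
  | some o, b :: r => PySem.List.pyRange o b 1 ++ pvProc none r

theorem pvB_fold (l : List (Int × Char)) (acc : List Int) (op : Option Int) :
    ((l.foldl
      (fun (st : List Int × Option Int) (p : Int × Char) =>
        if p.2 = '"' ∨ p.2 = '\'' then
          match st.2 with
          | none => (st.1, some p.1)
          | some o => (st.1 ++ PySem.List.pyRange o p.1 1, none)
        else st)
      (acc, op)).1) = acc ++ pvProc op (pvQuotes l) := by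
  induction l generalizing acc op with
  | nil => cases op <;> simp [pvQuotes, pvProc]
  | cons p r ih =>
    by_cases hq : p.2 = '"' ∨ p.2 = '\''
    · cases op <;> simp [List.foldl_cons, pvQuotes, if_pos hq, ih, pvProc]
    · simp [List.foldl_cons, pvQuotes, if_neg hq, ih]

theorem pvProc_eq_pairExpand (q : List Int) :
    pvProc none q = pvPairExpand q ∧ ∀ a, pvProc (some a) q = pvPairExpand (a :: q) := by
  induction q with
  | nil => exact ⟨rfl, fun a => rfl⟩
  | cons x r ih =>
    refine ⟨?_, fun a => ?_⟩
    · show pvProc (some x) r = _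
      rw [ih.2 x]
    · show PySem.List.pyRange a x 1 ++ pvProc none r = _
      rw [ih.1]; rfl

-- stepping the index by 2 drops two elements
theorem pv_gbp_loop_shift (l : List Int) (x y : Int) (i : Nat) (res : List (Int × Int)) :
    pv_gbp_loop (x :: y :: l) (i + 2) res = pv_gbp_loop l i res := by
  conv_lhs => rw [pv_gbp_loop]
  conv_rhs => rw [pv_gbp_loop]
  by_cases h : i < l.length
  · rw [dif_pos (show i + 2 < (x :: y :: l).length by simp; omega), dif_pos h]
    have h1 : PySem.List.pyGet? (x :: y :: l) ((i + 2 : Nat) : Int) = PySem.List.pyGet? l (i : Int) := by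
      rw [PySem.List.pyGet?_natCast, PySem.List.pyGet?_natCast]; simp
    have h2 : PySem.List.pyGet? (x :: y :: l) (((i + 2 : Nat) : Int) + 1) = PySem.List.pyGet? l ((i : Int) + 1) := by
      have e1 : (((i + 2 : Nat) : Int) + 1) = ((i + 3 : Nat) : Int) := by push_cast; ring
      have e2 : ((i : Int) + 1) = ((i + 1 : Nat) : Int) := by push_cast; ring
      rw [e1, e2, PySem.List.pyGet?_natCast, PySem.List.pyGet?_natCast]; simp
    rw [h1, h2]
    exact pv_gbp_loop_shift l x y (i + 2) _
  · rw [dif_neg (show ¬ i + 2 < (x :: y :: l).length by simp; omega), dif_neg h]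
termination_by l.length - i

theorem pv_gbp_pairs (q : List Int) (hq : q.length % 2 = 0) (res : List (Int × Int)) :
    pv_gbp_loop q 0 res =
      res ++ (match q with
              | a :: b :: r => (a, b) :: pv_gbp_loop r 0 []
              | _ => []) := by
  match q with
  | [] => rw [pv_gbp_loop]; simp
  | [a] => simp at hq
  | a :: b :: r =>
    rw [pv_gbp_loop]
    simp only [List.length_cons]
    have ha : PySem.List.pyGet? (a :: b :: r) ((0 : Nat) : Int) = some a := by
      rw [PySem.List.pyGet?_natCast]; rfl
    have hb : PySem.List.pyGet? (a :: b :: r) (((0 : Nat) : Int) + 1) = some b := by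
      have : (((0 : Nat) : Int) + 1) = ((1 : Nat) : Int) := by norm_num
      rw [this, PySem.List.pyGet?_natCast]; rfl
    rw [ha, hb]
    have hr : r.length % 2 = 0 := by simp [List.length_cons] at hq; omega
    rw [show (0 + 2 : Nat) = 0 + 2 from rfl, pv_gbp_loop_shift r a b 0 _,
        pv_gbp_pairs r hr, pv_gbp_pairs r hr []]
    simp
termination_by q.length

-- for even-length q, A's group-and-expand is pvPairExpand
theorem pvA_post_even (q : List Int) (hq : q.length % 2 = 0) :
    ((group_by_pairs q).map (fun pair => PySem.List.pyRange pair.1 pair.2 1)).flatten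
      = pvPairExpand q := by
  match q with
  | [] => rw [group_by_pairs, pv_gbp_loop]; simp [pvPairExpand]
  | [a] => simp at hq
  | a :: b :: r =>
    have hr : r.length % 2 = 0 := by simp [List.length_cons] at hq; omega
    unfold group_by_pairs
    rw [pv_gbp_pairs _ hq]
    simp only [List.nil_append, List.map_cons, List.flatten_cons]
    rw [show pv_gbp_loop r 0 [] = group_by_pairs r from rfl, pvA_post_even r hr]
    rfl
termination_by q.length

-- dropping a dangling last element does not change pvPairExpand on odd-length lists
theorem pvPairExpand_dropLast (q : List Int) (hq : q.length % 2 = 1) :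
    pvPairExpand q.dropLast = pvPairExpand q := by
  match q with
  | [] => simp at hq
  | [a] => rfl
  | a :: b :: r =>
    have hr : r.length % 2 = 1 := by simp [List.length_cons] at hq; omega
    have hne : r ≠ [] := by intro h; rw [h] at hr; simp at hr
    have : (a :: b :: r).dropLast = a :: b :: r.dropLast := by
      simp [List.dropLast_cons_of_ne_nil, hne]
    rw [this]
    show PySem.List.pyRange a b 1 ++ pvPairExpand r.dropLast = _
    rw [pvPairExpand_dropLast r hr]; rfl
termination_by q.length

-- ===== VERDICT (by name: the statement is the Claim_ definition above) =====
theorem get_string_pairs_indexes_spec : Claim_equal_get_string_pairs_indexes := by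
  intro line _
  show get_string_pairs_indexes line = get_string_pairs_indexes_alt line
  simp only [get_string_pairs_indexes, get_string_pairs_indexes_alt, pvA_fold_indexes, pvB_fold,
    List.nil_append]
  rw [(pvProc_eq_pairExpand _).1]
  set q := pvQuotes (PySem.List.enumerate line.toList) with hqdef
  by_cases h : q.length % 2 = 0
  · rw [if_neg (show ¬ q.length % 2 ≠ 0 by omega)]
    exact pvA_post_even q h
  · have h1 : q.length % 2 = 1 := by omega
    rw [if_pos (show q.length % 2 ≠ 0 by omega)]
    have hd : q.dropLast.length % 2 = 0 := by
      rcases q with _ | ⟨x, r⟩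
      · simp at h1
      · simp only [List.length_dropLast, List.length_cons] at *
        omega
    rw [pvA_post_even _ hd]
    exact pvPairExpand_dropLast q h1
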